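-- pv_equiv track=rewrite | github.com/GundalaNikhil/DSA | dsa-problems/DP/solutions/DP-010-lcs-with-skips.py | lcs_with_skip_limit
-- ===== SOURCE A (Python) =====
-- def lcs_with_skip_limit(a: str, b: str, s: int) -> int:
--     n, m = len(a), len(b)
--     prev = [0] * (m + 1)
--     cur = [0] * (m + 1)
--
--     for i in range(1, n + 1):
--         cur[0] = 0
--         ai = a[i - 1]
--         for j in range(1, m + 1):
--             if ai == b[j - 1]:
--                 cur[j] = prev[j - 1] + 1
--             else:
--                 cur[j] = max(prev[j], cur[j - 1])
--         prev, cur = cur, prev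
--
--     L = prev[m]
--     return L if n - L <= s else -1
-- ===== SOURCE B (Python) =====
-- def lcs_with_skip_limit(a: str, b: str, s: int) -> int:
--     # Method of thresholds (Hunt-style): t[k] = smallest index in b at which a
--     # common subsequence of length k+1 with the processed prefix of a can end.
--     # t stays strictly increasing; the LCS length is len(t).
--     t = []
--     for ch in a:
--         for j in reversed(range(len(b))):
--             if b[j] == ch:
--                 lo, hi = 0, len(t)
--                 while lo < hi:
--                     mid = (lo + hi) // 2
--                     if t[mid] < j:
--                         lo = mid + 1
--                     else:
--                         hi = mid
--                 if lo == len(t):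
--                     t.append(j)
--                 else:
--                     t[lo] = j
--     L = len(t)
--     return L if len(a) - L <= s else -1
-- ===== Notes on version B (the rewrite author's own statement) =====
-- stated objective: alternative
-- what changed: Replaces A's row-by-row DP over two rolling arrays with the method of thresholds (Hunt-style): a strictly increasing list t where t[k] is the smallest end position in b of a common subsequence of length k+1, updated per match position (scanned in descending order) by a binary search that replaces the first threshold >= j; the LCS length is len(t), with the same skip check at the end.
import Mathlib
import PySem

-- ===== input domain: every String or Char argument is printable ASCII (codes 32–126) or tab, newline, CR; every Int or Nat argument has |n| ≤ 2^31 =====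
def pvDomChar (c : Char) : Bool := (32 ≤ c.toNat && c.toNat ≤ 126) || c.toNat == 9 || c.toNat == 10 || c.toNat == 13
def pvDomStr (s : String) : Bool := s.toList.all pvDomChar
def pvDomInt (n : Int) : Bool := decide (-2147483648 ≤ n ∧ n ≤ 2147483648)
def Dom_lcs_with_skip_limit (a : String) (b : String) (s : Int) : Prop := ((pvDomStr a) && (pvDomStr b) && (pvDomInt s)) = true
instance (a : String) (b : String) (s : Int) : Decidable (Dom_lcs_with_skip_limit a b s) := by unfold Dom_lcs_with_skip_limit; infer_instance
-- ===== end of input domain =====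

-- B replaces A's two rolling DP rows with the method of thresholds (Hunt-style):
-- a strictly increasing list of smallest end positions per LCS length, updated by
-- binary search per match; objective: alternative algorithm, same worst-case cost.
-- ===== PORT A =====
def lcs_with_skip_limit (a : String) (b : String) (s : Int) : Int :=
  let A := a.toList
  let B := b.toList
  let n := A.length
  let m := B.length
  let res := (List.range n).foldl (fun (pc : List Int × List Int) i =>
      let ai := A.getD i ' '
      let c0 := pc.2.set 0 0
      let c := (List.range m).foldl (fun cur j =>
          cur.set (j+1) (if ai = B.getD j ' ' then pc.1.getD j 0 + 1
            else max (pc.1.getD (j+1) 0) (cur.getD j 0))) c0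
      (c, pc.1)) (List.replicate (m+1) 0, List.replicate (m+1) 0)
  let L := res.1.getD m 0
  if (n : Int) - L ≤ s then L else -1

-- ===== PORT B =====
-- Source B's while-loop binary search: first index in t[lo:hi] holding a value ≥ j.
-- t.getD mid 0 is exact: the loop keeps mid < hi ≤ len(t), so Python's t[mid] is in range.
def bsearchB (t : List Int) (j : Int) (lo hi : Nat) : Nat :=
  if _h : lo < hi then
    let mid := (lo + hi) / 2
    if t.getD mid 0 < j then bsearchB t j (mid + 1) hi else bsearchB t j lo mid
  else lo
termination_by hi - lo
decreasing_by all_goals omega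

-- body of Source B's `if b[j] == ch` branch: replace first threshold ≥ j, or append
def updB (t : List Int) (j : Int) : List Int :=
  let lo := bsearchB t j 0 t.length
  if lo = t.length then t ++ [j] else t.set lo j

-- Y.getD j ' ' is exact: j ranges over reversed(range(len(b))), so b[j] is in range.
def lcs_with_skip_limit_alt (a : String) (b : String) (s : Int) : Int :=
  let Y := b.toList
  let t := a.toList.foldl (fun t ch =>
      ((List.range Y.length).reverse).foldl (fun t j =>
        if Y.getD j ' ' = ch then updB t (j : Int) else t) t) []
  if (a.toList.length : Int) - (t.length : Int) ≤ s then (t.length : Int) else -1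

-- ===== PRECONDITION & SPEC =====
def Spec_lcs_with_skip_limit (a : String) (b : String) (s : Int) (out : Int) : Prop := out = lcs_with_skip_limit_alt a b s
instance (a : String) (b : String) (s : Int) (out : Int) : Decidable (Spec_lcs_with_skip_limit a b s out) := by unfold Spec_lcs_with_skip_limit; infer_instance

-- ===== CLAIM (what is proved, stated in full; the proofs are below) =====
def Claim_equal_lcs_with_skip_limit : Prop := ∀ (a : String) (b : String) (s : Int), Dom_lcs_with_skip_limit a b s → Spec_lcs_with_skip_limit a b s (lcs_with_skip_limit a b s)

-- ===== LEMMAS AND PROOFS =====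

-- pvF X Y i j = LCS length of the prefixes X[:i] and Y[:j] (the shared DP recurrence).
def pvF (X Y : List Char) (i j : Nat) : Int :=
  match i, j with
  | 0, _ => 0
  | _+1, 0 => 0
  | i'+1, j'+1 =>
    if X.getD i' ' ' = Y.getD j' ' ' then pvF X Y i' j' + 1
    else max (pvF X Y i' (j'+1)) (pvF X Y (i'+1) j')
termination_by (i, j)

-- pvRow X Y q t len = [pvF X Y q t, pvF X Y q (t+1), …] of length len (row q of the DP table).
def pvRow (X Y : List Char) (q t len : Nat) : List Int :=
  match len with
  | 0 => []
  | len'+1 => pvF X Y q t :: pvRow X Y q (t+1) len'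

lemma pvF_zero_left (X Y : List Char) (j : Nat) : pvF X Y 0 j = 0 := by
  cases j <;> simp [pvF]

lemma pvF_zero_right (X Y : List Char) (i : Nat) : pvF X Y i 0 = 0 := by
  cases i <;> simp [pvF]

lemma pvRow_length (X Y : List Char) (q t len : Nat) : (pvRow X Y q t len).length = len := by
  induction len generalizing t with
  | zero => simp [pvRow]
  | succ len ih => simp [pvRow, ih]

lemma pvRow_getD (X Y : List Char) (q t len u : Nat) (h : u < len) :
    (pvRow X Y q t len).getD u 0 = pvF X Y q (t+u) := by
  induction len generalizing t u with
  | zero => omega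
  | succ len ih =>
    cases u with
    | zero => simp [pvRow]
    | succ u =>
      have := ih (t+1) u (by omega)
      simp only [pvRow, List.getD_cons_succ]
      rw [this]; ring_nf

lemma pvRow_snoc (X Y : List Char) (q t len : Nat) :
    pvRow X Y q t (len+1) = pvRow X Y q t len ++ [pvF X Y q (t+len)] := by
  induction len generalizing t with
  | zero => simp [pvRow]
  | succ len ih =>
    rw [show pvRow X Y q t (len+1+1) = pvF X Y q t :: pvRow X Y q (t+1) (len+1) from rfl, ih]
    simp [pvRow]; ring_nf

lemma replicate_eq_pvRow (X Y : List Char) (t len : Nat) :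
    List.replicate len (0:Int) = pvRow X Y 0 t len := by
  induction len generalizing t with
  | zero => simp [pvRow]
  | succ len ih =>
    rw [List.replicate_succ]
    simp only [pvRow, pvF_zero_left]
    rw [ih (t+1)]

lemma set_append_cons (l1 r' : List Int) (r0 v : Int) :
    (l1 ++ r0 :: r').set l1.length v = l1 ++ v :: r' := by
  simp

-- A's inner loop: after the first k iterations positions 0..k hold row i+1, the tail is stale.
lemma innerA (X Y : List Char) (i : Nat) (prev cur : List Int)
    (hp : prev = pvRow X Y i 0 (Y.length+1)) (hc : cur.length = Y.length + 1)
    (k : Nat) (hk : k ≤ Y.length) :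
    ∃ rest : List Int,
      (List.range k).foldl (fun c j =>
          c.set (j+1) (if X.getD i ' ' = Y.getD j ' ' then prev.getD j 0 + 1
            else max (prev.getD (j+1) 0) (c.getD j 0))) (cur.set 0 0)
        = pvRow X Y (i+1) 0 (k+1) ++ rest ∧ rest.length = Y.length - k := by
  induction k with
  | zero =>
    match cur with
    | [] => simp at hc
    | c0 :: cs =>
      refine ⟨cs, ?_, ?_⟩
      · simp [pvRow, pvF_zero_right]
      · simp at hc; omega
  | succ k ih =>
    obtain ⟨rest, he, hl⟩ := ih (by omega)
    match rest, hl with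
    | [], hl => simp at hl; omega
    | r0 :: r', hl =>
      rw [List.range_succ, List.foldl_append, he]
      simp only [List.foldl_cons, List.foldl_nil]
      have hgd : (pvRow X Y (i+1) 0 (k+1) ++ r0 :: r').getD k 0 = pvF X Y (i+1) k := by
        rw [List.getD_append _ _ _ _ (by rw [pvRow_length]; omega),
          pvRow_getD _ _ _ _ _ _ (by omega)]
        norm_num
      have hprev1 : prev.getD k 0 = pvF X Y i k := by
        rw [hp, pvRow_getD _ _ _ _ _ _ (by omega)]
        norm_num
      have hprev2 : prev.getD (k+1) 0 = pvF X Y i (k+1) := by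
        rw [hp, pvRow_getD _ _ _ _ _ _ (by omega)]
        norm_num
      have hv : (if X.getD i ' ' = Y.getD k ' ' then prev.getD k 0 + 1
              else max (prev.getD (k+1) 0) ((pvRow X Y (i+1) 0 (k+1) ++ r0 :: r').getD k 0))
            = pvF X Y (i+1) (k+1) := by
        rw [hgd, hprev1, hprev2]
        simp [pvF]
      have hset := set_append_cons (pvRow X Y (i+1) 0 (k+1)) r' r0 (pvF X Y (i+1) (k+1))
      rw [pvRow_length] at hset
      rw [hv, hset]
      refine ⟨r', ?_, by simp at hl ⊢; omega⟩
      rw [pvRow_snoc X Y (i+1) 0 (k+1), pvRow_snoc X Y (i+1) 0 k]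
      simp

-- A's outer loop: after k iterations the first buffer is row k, the second has full length.
lemma outerA (X Y : List Char) (k : Nat) :
    ((List.range k).foldl (fun (pc : List Int × List Int) i =>
        ((List.range Y.length).foldl (fun cur j =>
            cur.set (j+1) (if X.getD i ' ' = Y.getD j ' ' then pc.1.getD j 0 + 1
              else max (pc.1.getD (j+1) 0) (cur.getD j 0))) (pc.2.set 0 0), pc.1))
      (List.replicate (Y.length+1) 0, List.replicate (Y.length+1) 0)).1
        = pvRow X Y k 0 (Y.length+1)
    ∧ ((List.range k).foldl (fun (pc : List Int × List Int) i =>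
        ((List.range Y.length).foldl (fun cur j =>
            cur.set (j+1) (if X.getD i ' ' = Y.getD j ' ' then pc.1.getD j 0 + 1
              else max (pc.1.getD (j+1) 0) (cur.getD j 0))) (pc.2.set 0 0), pc.1))
      (List.replicate (Y.length+1) 0, List.replicate (Y.length+1) 0)).2.length
        = Y.length + 1 := by
  induction k with
  | zero =>
    refine ⟨?_, by simp⟩
    simp only [List.range_zero, List.foldl_nil]
    exact replicate_eq_pvRow X Y 0 (Y.length+1)
  | succ k ih =>
    obtain ⟨h1, h2⟩ := ih
    rw [List.range_succ, List.foldl_append]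
    simp only [List.foldl_cons, List.foldl_nil]
    obtain ⟨rest, he, hl⟩ := innerA X Y k _ _ h1 h2 Y.length le_rfl
    have hrest : rest = [] := by
      cases rest with
      | nil => rfl
      | cons x l => simp at hl
    subst hrest
    rw [he]
    refine ⟨by simp, ?_⟩
    rw [h1, pvRow_length]

-- ===== B-side machinery =====

-- basic DP inequalities: monotone in j, and one extra column adds at most 1
lemma pvF_steps (N : Nat) : ∀ (X Y : List Char) (i j : Nat), i + j ≤ N →
    (pvF X Y i j ≤ pvF X Y i (j+1)) ∧ (pvF X Y i (j+1) ≤ pvF X Y i j + 1) ∧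
    (pvF X Y i j ≤ pvF X Y (i+1) j) ∧ (pvF X Y (i+1) j ≤ pvF X Y i j + 1) := by
  induction N with
  | zero =>
    intro X Y i j h
    have hi : i = 0 := by omega
    have hj : j = 0 := by omega
    subst hi; subst hj
    simp [pvF_zero_left, pvF_zero_right]
  | succ N ih =>
    intro X Y i j h
    refine ⟨?_, ?_, ?_, ?_⟩
    · -- pvF i j ≤ pvF i (j+1)
      match i with
      | 0 => simp [pvF_zero_left]
      | i'+1 =>
        by_cases hc : X.getD i' ' ' = Y.getD j ' '
        · simp only [pvF, if_pos hc]
          exact (ih X Y i' j (by omega)).2.2.2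
        · simp only [pvF, if_neg hc]
          cases j with
          | zero => simp [pvF_zero_right]
          | succ j' => exact le_max_right _ _
    · -- pvF i (j+1) ≤ pvF i j + 1
      match i with
      | 0 => simp [pvF_zero_left]
      | i'+1 =>
        by_cases hc : X.getD i' ' ' = Y.getD j ' '
        · simp only [pvF, if_pos hc]
          have h3 := (ih X Y i' j (by omega)).2.2.1
          omega
        · simp only [pvF, if_neg hc]
          have h2 := (ih X Y i' j (by omega)).2.1
          have h3 := (ih X Y i' j (by omega)).2.2.1
          have := max_le (le_trans h2 (by omega : pvF X Y i' j + 1 ≤ pvF X Y (i'+1) j + 1))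
            (by omega : pvF X Y (i'+1) j ≤ pvF X Y (i'+1) j + 1)
          exact this
    · -- pvF i j ≤ pvF (i+1) j
      match j with
      | 0 => simp [pvF_zero_right]
      | j'+1 =>
        by_cases hc : X.getD i ' ' = Y.getD j' ' '
        · simp only [pvF, if_pos hc]
          have h2 := (ih X Y i j' (by omega)).2.1
          omega
        · simp only [pvF, if_neg hc]
          exact le_max_left _ _
    · -- pvF (i+1) j ≤ pvF i j + 1
      match j with
      | 0 => simp [pvF_zero_right]
      | j'+1 =>
        by_cases hc : X.getD i ' ' = Y.getD j' ' '
        · simp only [pvF, if_pos hc]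
          have h1 := (ih X Y i j' (by omega)).1
          omega
        · simp only [pvF, if_neg hc]
          have h1 := (ih X Y i j' (by omega)).1
          have h4 := (ih X Y i j' (by omega)).2.2.2
          exact max_le (by omega) (by omega)
  
lemma pvF_le_succ_j (X Y : List Char) (i j : Nat) : pvF X Y i j ≤ pvF X Y i (j+1) :=
  ((pvF_steps (i+j) X Y i j le_rfl).1)

lemma pvF_succ_le_j (X Y : List Char) (i j : Nat) : pvF X Y i (j+1) ≤ pvF X Y i j + 1 :=
  ((pvF_steps (i+j) X Y i j le_rfl).2.1)

lemma pvF_mono_j (X Y : List Char) (i : Nat) {j j' : Nat} (h : j ≤ j') :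
    pvF X Y i j ≤ pvF X Y i j' := by
  induction j' with
  | zero => simp_all
  | succ j' ih =>
    rcases Nat.lt_or_ge j (j'+1) with hlt | hge
    · exact le_trans (ih (by omega)) (pvF_le_succ_j X Y i j')
    · have : j = j' + 1 := by omega
      simp [this]

-- hybrid row: row i+1 of the DP where only match positions ≥ P have been applied
def hybF (X Y : List Char) (i P j : Nat) : Int :=
  match j with
  | 0 => 0
  | j'+1 => if Y.getD j' ' ' = X.getD i ' ' ∧ P ≤ j' then pvF X Y i j' + 1
            else max (pvF X Y i (j'+1)) (hybF X Y i P j')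

lemma hyb_eq_pvF (X Y : List Char) (i P j : Nat) (h : j ≤ P) : hybF X Y i P j = pvF X Y i j := by
  induction j with
  | zero => simp [hybF, pvF_zero_right]
  | succ j' ih =>
    have hcond : ¬ (Y.getD j' ' ' = X.getD i ' ' ∧ P ≤ j') := by
      rintro ⟨-, hP⟩; omega
    simp only [hybF, if_neg hcond]
    rw [ih (by omega)]
    exact max_eq_left (pvF_le_succ_j X Y i j')

lemma hyb_zero (X Y : List Char) (i j : Nat) : hybF X Y i 0 j = pvF X Y (i+1) j := by
  induction j with
  | zero => simp [hybF, pvF_zero_right]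
  | succ j' ih =>
    by_cases hc : Y.getD j' ' ' = X.getD i ' '
    · simp only [hybF, pvF, if_pos (And.intro hc (Nat.zero_le _)), if_pos hc.symm]
    · have hc' : ¬ (X.getD i ' ' = Y.getD j' ' ') := fun h => hc h.symm
      have cA : ¬ (Y.getD j' ' ' = X.getD i ' ' ∧ 0 ≤ j') := by rintro ⟨h2, -⟩; exact hc h2
      simp only [hybF, pvF, if_neg cA, if_neg hc', ih]

lemma hyb_skip (X Y : List Char) (i p j : Nat) (h : Y.getD p ' ' ≠ X.getD i ' ') :
    hybF X Y i p j = hybF X Y i (p+1) j := by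
  induction j with
  | zero => rfl
  | succ j' ih =>
    have hcond : (Y.getD j' ' ' = X.getD i ' ' ∧ p ≤ j') ↔ (Y.getD j' ' ' = X.getD i ' ' ∧ p+1 ≤ j') := by
      constructor
      · rintro ⟨hch, hle⟩
        refine ⟨hch, ?_⟩
        rcases Nat.lt_or_ge p j' with h1 | h1
        · omega
        · exfalso; have : p = j' := by omega
          exact h (this ▸ hch)
      · rintro ⟨hch, hle⟩; exact ⟨hch, by omega⟩
    by_cases hc : Y.getD j' ' ' = X.getD i ' ' ∧ p ≤ j'
    · simp only [hybF, if_pos hc, if_pos (hcond.mp hc)]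
    · simp only [hybF, if_neg hc, if_neg (fun h' => hc (hcond.mpr h')), ih]

lemma hyb_update (X Y : List Char) (i p j : Nat) (h : Y.getD p ' ' = X.getD i ' ') :
    hybF X Y i p j = if j ≤ p then hybF X Y i (p+1) j
      else max (hybF X Y i (p+1) j) (pvF X Y i p + 1) := by
  induction j with
  | zero => simp [hybF]
  | succ j' ih =>
    rcases Nat.lt_trichotomy j' p with hlt | heq | hgt
    · -- j' < p : both hybrids agree below p+1
      rw [if_pos (by omega : j' + 1 ≤ p)]
      have c1 : ¬ (Y.getD j' ' ' = X.getD i ' ' ∧ p ≤ j') := by rintro ⟨-, h2⟩; omega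
      have c2 : ¬ (Y.getD j' ' ' = X.getD i ' ' ∧ p+1 ≤ j') := by rintro ⟨-, h2⟩; omega
      simp only [hybF, if_neg c1, if_neg c2]
      rw [ih, if_pos (by omega : j' ≤ p)]
    · -- j' = p : the match fires
      subst heq
      rw [if_neg (by omega : ¬ j' + 1 ≤ j')]
      have c1 : (Y.getD j' ' ' = X.getD i ' ' ∧ j' ≤ j') := ⟨h, le_rfl⟩
      rw [hyb_eq_pvF X Y i (j'+1) (j'+1) le_rfl]
      simp only [hybF, if_pos c1]
      exact (max_eq_right (pvF_succ_le_j X Y i j')).symm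
    · -- j' > p
      rw [if_neg (by omega : ¬ j' + 1 ≤ p)]
      by_cases hc : Y.getD j' ' ' = X.getD i ' '
      · have c1 : (Y.getD j' ' ' = X.getD i ' ' ∧ p ≤ j') := ⟨hc, by omega⟩
        have c2 : (Y.getD j' ' ' = X.getD i ' ' ∧ p+1 ≤ j') := ⟨hc, by omega⟩
        simp only [hybF, if_pos c1, if_pos c2]
        exact (max_eq_left (by
          have := pvF_mono_j X Y i (show p ≤ j' by omega)
          omega)).symm
      · have c1 : ¬ (Y.getD j' ' ' = X.getD i ' ' ∧ p ≤ j') := by rintro ⟨h2, -⟩; exact hc h2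
        have c2 : ¬ (Y.getD j' ' ' = X.getD i ' ' ∧ p+1 ≤ j') := by rintro ⟨h2, -⟩; exact hc h2
        simp only [hybF, if_neg c1, if_neg c2]
        rw [ih, if_neg (by omega : ¬ j' ≤ p), ← max_assoc]

-- count of thresholds below q
def cntLt (t : List Int) (q : Int) : Int := ((t.filter (fun x => decide (x < q))).length : Int)

-- t represents the row f: strictly increasing, in [0,m), counts give f
def RepT (t : List Int) (m : Nat) (f : Nat → Int) : Prop :=
  List.Pairwise (· < ·) t ∧ (∀ x ∈ t, 0 ≤ x ∧ x < (m:Int)) ∧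
    (∀ q : Nat, q ≤ m → cntLt t q = f q)

lemma sorted_getD_le (t : List Int) (hs : List.Pairwise (· < ·) t) {k k' : Nat}
    (hk : k ≤ k') (hk' : k' < t.length) : t.getD k 0 ≤ t.getD k' 0 := by
  rcases Nat.eq_or_lt_of_le hk with heq | hlt
  · subst heq; exact le_rfl
  · have := (List.pairwise_iff_getElem.mp hs) k k' (by omega) hk' hlt
    rw [List.getD_eq_getElem _ _ (by omega : k < t.length), List.getD_eq_getElem _ _ hk']
    exact le_of_lt this

lemma bsearch_go (t : List Int) (p : Int) (hs : List.Pairwise (· < ·) t) :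
    ∀ (n lo hi : Nat), hi - lo ≤ n → lo ≤ hi → hi ≤ t.length →
    (∀ k, k < lo → t.getD k 0 < p) → (∀ k, hi ≤ k → k < t.length → p ≤ t.getD k 0) →
    (bsearchB t p lo hi ≤ t.length ∧
     (∀ k, k < bsearchB t p lo hi → t.getD k 0 < p) ∧
     (∀ k, bsearchB t p lo hi ≤ k → k < t.length → p ≤ t.getD k 0)) := by
  intro n
  induction n with
  | zero =>
    intro lo hi h1 h2 h3 hlo hhi
    have hn : ¬ lo < hi := by omega
    rw [bsearchB, dif_neg hn]
    exact ⟨by omega, hlo, fun k hk1 hk2 => hhi k (by omega) hk2⟩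
  | succ n ih =>
    intro lo hi h1 h2 h3 hlo hhi
    by_cases hlt : lo < hi
    · rw [bsearchB, dif_pos hlt]
      have hmid : (lo + hi) / 2 < t.length := by omega
      by_cases hc : t.getD ((lo + hi) / 2) 0 < p
      · rw [if_pos hc]
        refine ih ((lo + hi) / 2 + 1) hi (by omega) (by omega) h3 ?_ hhi
        intro k hk
        exact lt_of_le_of_lt (sorted_getD_le t hs (by omega) hmid) hc
      · rw [if_neg hc]
        refine ih lo ((lo + hi) / 2) (by omega) (by omega) (by omega) hlo ?_
        intro k hk1 hk2
        exact le_trans (not_lt.mp hc) (sorted_getD_le t hs hk1 hk2)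
    · rw [bsearchB, dif_neg hlt]
      exact ⟨by omega, hlo, fun k hk1 hk2 => hhi k (by omega) hk2⟩

lemma bsearch_spec (t : List Int) (p : Int) (hs : List.Pairwise (· < ·) t) :
    (bsearchB t p 0 t.length ≤ t.length ∧
     (∀ k, k < bsearchB t p 0 t.length → t.getD k 0 < p) ∧
     (∀ k, bsearchB t p 0 t.length ≤ k → k < t.length → p ≤ t.getD k 0)) :=
  bsearch_go t p hs t.length 0 t.length (by omega) (by omega) le_rfl
    (fun k hk => absurd hk (Nat.not_lt_zero k)) (fun k hk1 hk2 => absurd (lt_of_le_of_lt hk1 hk2) (lt_irrefl _))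

lemma cnt_append (l1 l2 : List Int) (q : Int) : cntLt (l1 ++ l2) q = cntLt l1 q + cntLt l2 q := by
  simp [cntLt, List.filter_append]

lemma cnt_cons (x : Int) (l : List Int) (q : Int) :
    cntLt (x :: l) q = (if x < q then 1 else 0) + cntLt l q := by
  by_cases h : x < q
  · simp [cntLt, h]
    omega
  · simp [cntLt, h]

lemma cnt_all (l : List Int) (q : Int) (h : ∀ x ∈ l, x < q) : cntLt l q = l.length := by
  unfold cntLt
  rw [List.filter_eq_self.mpr (fun a ha => decide_eq_true (h a ha))]

lemma cnt_none (l : List Int) (q : Int) (h : ∀ x ∈ l, ¬ x < q) : cntLt l q = 0 := by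
  unfold cntLt
  rw [List.filter_eq_nil_iff.mpr (fun a ha => by simpa using h a ha)]
  rfl

lemma cnt_nonneg (l : List Int) (q : Int) : 0 ≤ cntLt l q := Int.natCast_nonneg _

lemma mem_take_lt (t : List Int) (r : Nat) (pi : Int)
    (h : ∀ k, k < r → t.getD k 0 < pi) : ∀ x ∈ t.take r, x < pi := by
  intro x hx
  obtain ⟨k, hk, he⟩ := List.mem_iff_getElem.mp hx
  have hk' : k < r := by
    have := hk; simp [List.length_take] at this; omega
  have hkl : k < t.length := by
    have := hk; simp [List.length_take] at this; omega
  have : (t.take r)[k]'hk = t[k]'hkl := List.getElem_take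
  rw [this] at he
  have := h k hk'
  rwa [List.getD_eq_getElem _ _ hkl, he] at this

lemma mem_drop_gt (t : List Int) (r : Nat) (pi : Int) (hs : List.Pairwise (· < ·) t)
    (hr : r < t.length) (hge : pi ≤ t.getD r 0) : ∀ x ∈ t.drop (r+1), pi < x := by
  intro x hx
  obtain ⟨k, hk, he⟩ := List.mem_iff_getElem.mp hx
  have hkl : r + 1 + k < t.length := by
    have := hk; simp [List.length_drop] at this; omega
  have hge2 : (t.drop (r+1))[k]'hk = t[r+1+k]'hkl := List.getElem_drop ..
  have hlt2 := (List.pairwise_iff_getElem.mp hs) r (r+1+k) hr hkl (by omega)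
  rw [List.getD_eq_getElem _ _ hr] at hge
  rw [hge2] at he
  rw [he] at hlt2
  exact lt_of_le_of_lt hge hlt2

lemma updB_rep (X Y : List Char) (i p : Nat) (t : List Int)
    (h : RepT t Y.length (hybF X Y i (p+1))) (hm : Y.getD p ' ' = X.getD i ' ')
    (hp : p < Y.length) : RepT (updB t (p:Int)) Y.length (hybF X Y i p) := by
  obtain ⟨hsort, hbnd, hcnt⟩ := h
  obtain ⟨hr_le, hlt, hge⟩ := bsearch_spec t (p:Int) hsort
  -- the search result counts the thresholds below p, i.e. it is pvF i p
  have hr_cnt : cntLt t (p:Int) = (bsearchB t (p:Int) 0 t.length : Int) := by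
    have hsplit := List.take_append_drop (bsearchB t (p:Int) 0 t.length) t
    rw [show t = t.take (bsearchB t (p:Int) 0 t.length) ++ t.drop (bsearchB t (p:Int) 0 t.length) from hsplit.symm,
      cnt_append,
      cnt_all _ _ (mem_take_lt t _ _ (fun k hk => hlt k hk)),
      cnt_none _ _ ?_]
    · simp [List.length_take]; omega
    · intro x hx
      obtain ⟨k, hk, he⟩ := List.mem_iff_getElem.mp hx
      have hkl : bsearchB t (p:Int) 0 t.length + k < t.length := by
        have := hk; simp [List.length_drop] at this; omega
      have he2 : (t.drop (bsearchB t (p:Int) 0 t.length))[k]'hk = t[bsearchB t (p:Int) 0 t.length + k]'hkl := List.getElem_drop ..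
      have := hge (bsearchB t (p:Int) 0 t.length + k) (by omega) hkl
      rw [List.getD_eq_getElem _ _ hkl] at this
      rw [he2] at he
      rw [he] at this
      omega
  have hr_val : (bsearchB t (p:Int) 0 t.length : Int) = pvF X Y i p := by
    rw [← hr_cnt, hcnt p (by omega), hyb_eq_pvF X Y i (p+1) p (by omega)]
  set r := bsearchB t (p:Int) 0 t.length with hr_def
  unfold updB
  rw [← hr_def]
  by_cases hcase : r = t.length
  · -- append case
    rw [if_pos hcase]
    have hall : ∀ x ∈ t, x < (p:Int) := by
      intro x hx
      obtain ⟨k, hk, he⟩ := List.mem_iff_getElem.mp hx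
      have := hlt k (by omega)
      rw [List.getD_eq_getElem _ _ hk] at this
      omega
    refine ⟨?_, ?_, ?_⟩
    · rw [List.pairwise_append]
      exact ⟨hsort, List.pairwise_singleton _ _, fun x hx y hy => by
        simp at hy; subst hy; exact hall x hx⟩
    · intro x hx
      rcases List.mem_append.mp hx with hx | hx
      · exact hbnd x hx
      · simp at hx; subst hx
        constructor
        · exact Int.natCast_nonneg _
        · exact_mod_cast hp
    · intro q hq
      rw [cnt_append, hyb_update X Y i p q hm]
      by_cases hqp : q ≤ p
      · rw [if_pos hqp, ← hcnt q hq]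
        have : ¬ ((p:Int) < (q:Int)) := by exact_mod_cast not_lt.mpr hqp
        rw [cnt_none [(p:Int)] _ (by intro x hx; simp at hx; subst hx; exact this)]
        omega
      · rw [if_neg hqp]
        have hpq : (p:Int) < (q:Int) := by exact_mod_cast Nat.lt_of_not_le hqp
        have h1 : cntLt [(p:Int)] (q:Int) = 1 := by
          rw [cnt_all _ _ (by intro x hx; simp at hx; subst hx; exact hpq)]; rfl
        have h2 : cntLt t (q:Int) = t.length := cnt_all _ _ (fun x hx => lt_trans (hall x hx) hpq)
        rw [← hcnt q hq, h1, h2]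
        have h4 : (t.length : Int) = pvF X Y i p := by rw [← hr_val, hcase]
        omega
  · -- replace case
    have hrl : r < t.length := by omega
    rw [if_neg hcase]
    have hdrop := List.drop_eq_getElem_cons hrl
    have hdecomp : t = t.take r ++ t[r] :: t.drop (r+1) := by
      conv_lhs => rw [← List.take_append_drop r t]
      rw [hdrop]
    have hset : t.set r (p:Int) = t.take r ++ (p:Int) :: t.drop (r+1) := by
      conv_lhs => rw [hdecomp]
      have := set_append_cons (t.take r) (t.drop (r+1)) (t[r]) (p:Int)
      rwa [List.length_take, min_eq_left (by omega)] at this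
    have htk : ∀ x ∈ t.take r, x < (p:Int) := mem_take_lt t r _ (fun k hk => hlt k hk)
    have hgr : (p:Int) ≤ t.getD r 0 := hge r le_rfl hrl
    have hdr : ∀ x ∈ t.drop (r+1), (p:Int) < x := mem_drop_gt t r _ hsort hrl hgr
    rw [hset]
    have htklen : (t.take r).length = r := by rw [List.length_take]; omega
    refine ⟨?_, ?_, ?_⟩
    · rw [List.pairwise_append]
      refine ⟨hsort.sublist (List.take_sublist _ _), ?_, ?_⟩
      · rw [List.pairwise_cons]
        exact ⟨fun x hx => hdr x hx, hsort.sublist (List.drop_sublist _ _)⟩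
      · intro x hx y hy
        rcases List.mem_cons.mp hy with hy | hy
        · subst hy; exact htk x hx
        · exact lt_trans (htk x hx) (hdr y hy)
    · intro x hx
      rcases List.mem_append.mp hx with hx | hx
      · exact hbnd x (List.mem_of_mem_take hx)
      · rcases List.mem_cons.mp hx with hx | hx
        · subst hx
          exact ⟨Int.natCast_nonneg _, by exact_mod_cast hp⟩
        · exact hbnd x (List.mem_of_mem_drop hx)
    · intro q hq
      have hcnt_t : cntLt t (q:Int)
          = (r : Int) * 0 + cntLt (t.take r) (q:Int) + (if t[r] < (q:Int) then 1 else 0) + cntLt (t.drop (r+1)) (q:Int) := by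
        conv_lhs => rw [hdecomp]
        rw [cnt_append, cnt_cons]; ring
      rw [cnt_append, cnt_cons, hyb_update X Y i p q hm]
      by_cases hqp : q ≤ p
      · rw [if_pos hqp, ← hcnt q hq, hcnt_t]
        have hnq : ¬ ((p:Int) < (q:Int)) := by exact_mod_cast not_lt.mpr hqp
        have hnr : ¬ (t[r] < (q:Int)) := by
          rw [List.getD_eq_getElem _ _ hrl] at hgr
          omega
        rw [if_neg hnq, if_neg hnr]
        ring
      · rw [if_neg hqp]
        have hpq : (p:Int) < (q:Int) := by exact_mod_cast Nat.lt_of_not_le hqp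
        have htkq : cntLt (t.take r) (q:Int) = r := by
          rw [cnt_all _ _ (fun x hx => lt_trans (htk x hx) hpq), htklen]
        rw [← hcnt q hq, hcnt_t, htkq, if_pos hpq]
        by_cases hmid : t[r] < (q:Int)
        · rw [if_pos hmid]
          have := cnt_nonneg (t.drop (r+1)) (q:Int)
          have := hr_val
          have hmax : max ((r:Int) + 1 + cntLt (t.drop (r+1)) (q:Int)) (pvF X Y i p + 1)
              = (r:Int) + 1 + cntLt (t.drop (r+1)) (q:Int) := by omega
          rw [show (r:Int) * 0 + (r:Int) + 1 + cntLt (t.drop (r+1)) (q:Int) = (r:Int) + 1 + cntLt (t.drop (r+1)) (q:Int) by ring, hmax]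
          ring
        · rw [if_neg hmid]
          have hdq : cntLt (t.drop (r+1)) (q:Int) = 0 := by
            refine cnt_none _ _ ?_
            have hdr2 : ∀ x ∈ t.drop (r+1), t.getD r 0 < x := mem_drop_gt t r _ hsort hrl le_rfl
            intro x hx
            have h1 := hdr2 x hx
            rw [List.getD_eq_getElem _ _ hrl] at h1
            omega
          rw [hdq]
          have := hr_val
          omega

-- inner loop over j = P-1, …, 0 turns the hybrid row at P into the hybrid row at 0
lemma innerB (X Y : List Char) (i : Nat) (P : Nat) (hP : P ≤ Y.length) (t : List Int)
    (h : RepT t Y.length (hybF X Y i P)) :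
    RepT (((List.range P).reverse).foldl (fun t j =>
        if Y.getD j ' ' = X.getD i ' ' then updB t (j : Int) else t) t)
      Y.length (hybF X Y i 0) := by
  induction P generalizing t with
  | zero => simpa using h
  | succ P ih =>
    have hsplit : (List.range (P+1)).reverse = P :: (List.range P).reverse := by
      rw [List.range_succ, List.reverse_append]
      rfl
    rw [hsplit, List.foldl_cons]
    by_cases hc : Y.getD P ' ' = X.getD i ' '
    · rw [if_pos hc]
      exact ih (by omega) _ (updB_rep X Y i P t h hc (by omega))
    · rw [if_neg hc]
      refine ih (by omega) t ⟨h.1, h.2.1, fun q hq => ?_⟩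
      rw [h.2.2 q hq, hyb_skip X Y i P q hc]

-- outer loop over the remaining characters of X
lemma outerB (X Y : List Char) (rest : List Char) (i : Nat) (hr : rest = X.drop i)
    (hi : i ≤ X.length)
    (t : List Int) (h : RepT t Y.length (fun q => pvF X Y i q)) :
    RepT (rest.foldl (fun t ch =>
        ((List.range Y.length).reverse).foldl (fun t j =>
          if Y.getD j ' ' = ch then updB t (j : Int) else t) t) t)
      Y.length (fun q => pvF X Y X.length q) := by
  induction rest generalizing i t with
  | nil =>
    have hlen := congrArg List.length hr
    simp at hlen
    have hieq : i = X.length := by omega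
    subst hieq
    simpa using h
  | cons ch rest ih =>
    have h0 : X[i]? = some ch := by
      have h1 : (X.drop i)[(0:Nat)]? = X[i+0]? := List.getElem?_drop
      rw [← hr] at h1; simpa using h1.symm
    have hch : X.getD i ' ' = ch := by
      simp [List.getD_eq_getElem?_getD, h0]
    have hklt : i < X.length := by
      rcases List.getElem?_eq_some_iff.mp h0 with ⟨hw, -⟩
      exact hw
    have hrest : rest = X.drop (i+1) := by
      have h2 : (X.drop i).drop 1 = X.drop (i+1) := by rw [List.drop_drop]
      rw [← hr] at h2; simpa using h2
    rw [List.foldl_cons]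
    have hstart : RepT t Y.length (hybF X Y i Y.length) :=
      ⟨h.1, h.2.1, fun q hq => by rw [h.2.2 q hq]; exact (hyb_eq_pvF X Y i Y.length q hq).symm⟩
    have hinner := innerB X Y i Y.length le_rfl t hstart
    rw [hch] at hinner
    exact ih (i+1) hrest (by omega) _
      ⟨hinner.1, hinner.2.1, fun q hq => by rw [hinner.2.2 q hq, hyb_zero]⟩

-- ===== VERDICT (by name: the statement is the Claim_ definition above) =====
theorem lcs_with_skip_limit_spec : Claim_equal_lcs_with_skip_limit := by
  intro a b s _
  unfold Spec_lcs_with_skip_limit lcs_with_skip_limit lcs_with_skip_limit_alt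
  have hA := (outerA a.toList b.toList a.toList.length).1
  have hB := outerB a.toList b.toList a.toList 0 (by simp) (by omega) []
    ⟨List.Pairwise.nil, by simp, fun q hq => by simp [cntLt, pvF_zero_left]⟩
  have hlen : ((a.toList.foldl (fun t ch =>
        ((List.range b.toList.length).reverse).foldl (fun t j =>
          if b.toList.getD j ' ' = ch then updB t (j : Int) else t) t) []).length : Int)
      = pvF a.toList b.toList a.toList.length b.toList.length := by
    have h1 := hB.2.2 b.toList.length le_rfl
    have h2 := cnt_all (a.toList.foldl (fun t ch =>
        ((List.range b.toList.length).reverse).foldl (fun t j =>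
          if b.toList.getD j ' ' = ch then updB t (j : Int) else t) t) [])
      (b.toList.length : Int) (fun x hx => (hB.2.1 x hx).2)
    rw [← h2, h1]
  simp only [hA, hlen]
  rw [pvRow_getD _ _ _ _ _ _ (by omega)]
  norm_num
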